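-- pv_equiv track=rewrite | github.com/Bryan-Brenes/PracticaExamen3 | Ejercicios.py | convertir_tiempos
-- ===== SOURCE A (Python) =====
-- def convertir_tiempos(lista, indice, resultado):
--     if indice == len(lista):
--         return resultado
--     else:
--         jugador = lista[indice]
--         tiempo = jugador[1]
--         seg = tiempo % 100
--         min = ((tiempo // 100) % 100) * 60
--         hor = (tiempo // 10000) * 3600
--         seg_t = seg + min + hor
--         nuevaInfo = [jugador[0], seg_t]
--         resultado.append(nuevaInfo)
--
--         return convertir_tiempos(lista, indice + 1, resultado)
-- ===== SOURCE B (Python) =====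
-- def convertir_tiempos(lista, indice, resultado):
--     # Iterative while-loop instead of A's tail recursion: same appends, same returned object.
--     while indice != len(lista):
--         jugador = lista[indice]
--         t = jugador[1]
--         resultado.append([jugador[0], t % 100 + (t // 100 % 100) * 60 + (t // 10000) * 3600])
--         indice += 1
--     return resultado
-- ===== Notes on version B (the rewrite author's own statement) =====
-- stated objective: idiomatic
-- what changed: Replaces A's tail recursion over an index (one stack frame per element, recursion-limit bound) with an iterative while-loop mutating the index and appending directly.
import Mathlib
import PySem

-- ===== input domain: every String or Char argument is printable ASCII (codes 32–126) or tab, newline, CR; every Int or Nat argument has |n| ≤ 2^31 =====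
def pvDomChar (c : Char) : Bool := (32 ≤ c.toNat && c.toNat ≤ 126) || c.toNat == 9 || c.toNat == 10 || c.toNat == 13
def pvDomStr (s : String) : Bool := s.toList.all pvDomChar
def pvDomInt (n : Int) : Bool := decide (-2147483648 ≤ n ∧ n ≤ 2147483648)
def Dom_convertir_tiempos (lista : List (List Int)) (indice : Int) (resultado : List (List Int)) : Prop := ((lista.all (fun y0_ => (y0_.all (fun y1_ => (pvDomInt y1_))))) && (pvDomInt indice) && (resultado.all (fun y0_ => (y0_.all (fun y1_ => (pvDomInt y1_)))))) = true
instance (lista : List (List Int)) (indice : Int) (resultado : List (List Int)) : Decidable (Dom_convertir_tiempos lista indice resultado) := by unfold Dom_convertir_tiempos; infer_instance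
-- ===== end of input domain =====

-- B replaces A's tail recursion over an index with an iterative while-loop over the same state (idiomatic; same O(n) cost, no recursion depth).
-- Both A and B mutate `resultado` in Python identically (same appends, same returned object); the theorems are about the return value.


-- ===== PORT A =====
-- literal transliteration of A's recursion; the in-range guards only totalize the indexing: their else-branches
-- are exactly Python's IndexError on lista[indice] / jugador[1] / jugador[0] (excluded by Pre_), and inside them
-- pyGetD is exact (2 ≤ len(jugador) ↔ jugador[1] and jugador[0] both succeed)
def convertir_tiempos (lista : List (List Int)) (indice : Int) (resultado : List (List Int)) : List (List Int) :=
  if indice = (lista.length : Int) then resultado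
  else if h : PySem.Raise.InRange lista.length indice then
    let jugador := PySem.List.pyGetD lista indice []
    if 2 ≤ jugador.length then
      let tiempo := PySem.List.pyGetD jugador 1 0
      let seg := PySem.Int.mod tiempo 100
      let min := (PySem.Int.mod (PySem.Int.floordiv tiempo 100) 100) * 60
      let hor := (PySem.Int.floordiv tiempo 10000) * 3600
      let seg_t := seg + min + hor
      let nuevaInfo := [PySem.List.pyGetD jugador 0 0, seg_t]
      convertir_tiempos lista (indice + 1) (resultado ++ [nuevaInfo])
    else resultado         -- IndexError: jugador[1] (or jugador[0])
  else resultado           -- IndexError: lista[indice]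
termination_by ((lista.length : Int) - indice).toNat
decreasing_by
  have h2 := h.2
  omega

-- ===== PORT B =====
-- B's while-loop: state = the two mutable locals (indice, resultado), one recursive call per loop pass;
-- the same in-range guards totalize the indexing (else-branches = Python's IndexError, excluded by Pre_)
def pvWhile (lista : List (List Int)) (st : Int × List (List Int)) : Int × List (List Int) :=
  if st.1 = (lista.length : Int) then st      -- while indice != len(lista): … falls through
  else if h : PySem.Raise.InRange lista.length st.1 then
    let jugador := PySem.List.pyGetD lista st.1 []
    if 2 ≤ jugador.length then
      let t := PySem.List.pyGetD jugador 1 0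
      pvWhile lista (st.1 + 1,
        st.2 ++ [[PySem.List.pyGetD jugador 0 0,
          PySem.Int.mod t 100 + (PySem.Int.mod (PySem.Int.floordiv t 100) 100) * 60 + (PySem.Int.floordiv t 10000) * 3600]])
    else st                -- IndexError: jugador[1] (or jugador[0])
  else st                  -- IndexError: lista[indice]
termination_by ((lista.length : Int) - st.1).toNat
decreasing_by
  have h2 := h.2
  omega

def convertir_tiempos_alt (lista : List (List Int)) (indice : Int) (resultado : List (List Int)) : List (List Int) :=
  (pvWhile lista (indice, resultado)).2

-- ===== PRECONDITION & SPEC =====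
-- Pre_ is exactly where Python A returns normally (no IndexError): either 0 ≤ indice ≤ len(lista) and every
-- row from position indice on has at least 2 fields, or -len(lista) ≤ indice < 0 (Python's negative indexing,
-- which then walks up through 0 to the end of the list) and every row has at least 2 fields.
def Pre_convertir_tiempos (lista : List (List Int)) (indice : Int) (resultado : List (List Int)) : Prop :=
  (0 ≤ indice ∧ indice ≤ (lista.length : Int) ∧ ∀ j ∈ lista.drop indice.toNat, 2 ≤ j.length) ∨
  (-(lista.length : Int) ≤ indice ∧ indice < 0 ∧ ∀ j ∈ lista, 2 ≤ j.length)
instance (lista : List (List Int)) (indice : Int) (resultado : List (List Int)) : Decidable (Pre_convertir_tiempos lista indice resultado) := by unfold Pre_convertir_tiempos; infer_instance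

def pvWitness_convertir_tiempos : List (List Int) × Int × List (List Int) :=
  ([[1, 12345], [2, 10101]], 0, [[9, 9]])

def Spec_convertir_tiempos (lista : List (List Int)) (indice : Int) (resultado : List (List Int)) (out : List (List Int)) : Prop := out = convertir_tiempos_alt lista indice resultado
instance (lista : List (List Int)) (indice : Int) (resultado : List (List Int)) (out : List (List Int)) : Decidable (Spec_convertir_tiempos lista indice resultado out) := by unfold Spec_convertir_tiempos; infer_instance

-- ===== CLAIM (what is proved, stated in full; the proofs are below) =====
def Claim_equal_convertir_tiempos : Prop := ∀ (lista : List (List Int)) (indice : Int) (resultado : List (List Int)), Dom_convertir_tiempos lista indice resultado → Pre_convertir_tiempos lista indice resultado → Spec_convertir_tiempos lista indice resultado (convertir_tiempos lista indice resultado)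

-- ===== LEMMAS AND PROOFS =====
-- A's recursion and B's loop advance the same state in lockstep: induction on the distance len - indice,
-- with the row-length condition carried as an invariant (its disjuncts mirror the two branches of Pre_).
lemma pvLockstep (lista : List (List Int)) :
    ∀ (n : Nat) (indice : Int) (resultado : List (List Int)),
      ((lista.length : Int) - indice).toNat = n →
      -(lista.length : Int) ≤ indice → indice ≤ (lista.length : Int) →
      ((∀ j ∈ lista, 2 ≤ j.length) ∨ (0 ≤ indice ∧ ∀ j ∈ lista.drop indice.toNat, 2 ≤ j.length)) →
      convertir_tiempos lista indice resultado = (pvWhile lista (indice, resultado)).2 := by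
  intro n
  induction n with
  | zero =>
    intro indice resultado hn hlo hhi _
    have hi : indice = (lista.length : Int) := by omega
    rw [convertir_tiempos, pvWhile]
    simp [hi]
  | succ n ih =>
    intro indice resultado hn hlo hhi hrows
    have hlt : indice < (lista.length : Int) := by omega
    have hne : indice ≠ (lista.length : Int) := by omega
    have hir : PySem.Raise.InRange lista.length indice := ⟨hlo, hlt⟩
    have hjlen : 2 ≤ (PySem.List.pyGetD lista indice ([] : List Int)).length := by
      rcases hrows with hall | ⟨h0i, htail⟩
      · exact hall _ (PySem.List.pyGetD_mem lista [] hir)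
      · rw [PySem.List.pyGetD_eq_getElem lista [] h0i hlt]
        refine htail _ ?_
        rw [List.drop_eq_getElem_cons (show indice.toNat < lista.length by omega)]
        exact List.mem_cons_self ..
    have hinv : (∀ j ∈ lista, 2 ≤ j.length) ∨
        (0 ≤ indice + 1 ∧ ∀ j ∈ lista.drop (indice + 1).toNat, 2 ≤ j.length) := by
      rcases hrows with hall | ⟨h0i, htail⟩
      · exact Or.inl hall
      · refine Or.inr ⟨by omega, fun j hj => htail j ?_⟩
        have h1n : (indice + 1).toNat = indice.toNat + 1 := by omega
        rw [h1n] at hj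
        rw [List.drop_eq_getElem_cons (by omega : indice.toNat < lista.length)]
        exact List.mem_cons_of_mem _ hj
    rw [convertir_tiempos, pvWhile]
    simp only [if_neg hne, dif_pos hir, if_pos hjlen]
    exact ih (indice + 1) _ (by omega) (by omega) (by omega) hinv

-- ===== VERDICT (by name: the statement is the Claim_ definition above) =====
theorem convertir_tiempos_spec : Claim_equal_convertir_tiempos := by
  intro lista indice resultado _ hpre
  unfold Spec_convertir_tiempos convertir_tiempos_alt
  rcases hpre with ⟨h0, hle, hrows⟩ | ⟨hlo, hneg, hall⟩
  · exact pvLockstep lista _ indice resultado rfl (by omega) hle (Or.inr ⟨h0, hrows⟩)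
  · exact pvLockstep lista _ indice resultado rfl hlo (by omega) (Or.inl hall)
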